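-- pv_equiv track=rewrite | github.com/kenchan0824/coding-challenges | Reformat Phone Number/string.py | solution
-- ===== SOURCE A (Python) =====
-- def solution(number):
--     number = number.replace(' ', ''). replace('-', '')
--     ans, i, n = [], 0, len(number)
--     while i < n:
--         if n - i in [2, 4]:
--             ans.append(number[i:i+2])
--             i += 2
--         else:
--             ans.append(number[i:i+3])
--             i += 3
--
--     return '-'.join(ans)
-- ===== SOURCE B (Python) =====
-- def solution(number):
--     s = number.replace(' ', '').replace('-', '')
--     n = len(s)
--     # closed-form chunk sizes from n mod 3, instead of a scanning loop
--     if n % 3 == 0: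
--         sizes = [3] * (n // 3)
--     elif n % 3 == 2:
--         sizes = [3] * (n // 3) + [2]
--     elif n >= 4:
--         sizes = [3] * ((n - 4) // 3) + [2, 2]
--     else:  # n == 1
--         sizes = [1]
--     parts, i = [], 0
--     for k in sizes:
--         parts.append(s[i:i + k])
--         i += k
--     return '-'.join(parts)
-- ===== Notes on version B (the rewrite author's own statement) =====
-- stated objective: alternative
-- what changed: B precomputes the whole chunk-size list in closed form from n mod 3 (all 3s; 3s plus a 2; 3s plus 2+2; or [1]) and then slices at those sizes, instead of A's scanning loop that decides 2-vs-3 per iteration by looking at the remaining length.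
import Mathlib
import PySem

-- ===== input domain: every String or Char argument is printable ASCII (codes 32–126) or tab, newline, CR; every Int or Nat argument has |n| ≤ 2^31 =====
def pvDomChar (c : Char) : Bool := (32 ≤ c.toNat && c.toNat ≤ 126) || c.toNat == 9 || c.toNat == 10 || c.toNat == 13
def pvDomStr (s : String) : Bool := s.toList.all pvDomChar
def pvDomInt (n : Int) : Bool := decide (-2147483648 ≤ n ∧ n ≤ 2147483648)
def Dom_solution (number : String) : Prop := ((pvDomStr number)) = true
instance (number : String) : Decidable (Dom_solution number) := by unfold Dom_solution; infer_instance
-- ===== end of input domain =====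

-- B derives the full chunk-size list in closed form from n mod 3 and slices once per size,
-- instead of A's scanning loop choosing 2 vs 3 per iteration from the remaining length.

-- ===== PORT A =====
-- while i < n: if n-i in [2,4] take 2 chars else take 3 chars
def solLoopA (s : List Char) (i : Nat) (ans : List (List Char)) : List (List Char) :=
  if _h : i < s.length then
    if s.length - i = 2 ∨ s.length - i = 4 then
      solLoopA s (i + 2) (ans ++ [PySem.List.slice s (some (i : Int)) (some ((i : Int) + 2))])
    else
      solLoopA s (i + 3) (ans ++ [PySem.List.slice s (some (i : Int)) (some ((i : Int) + 3))])
  else ans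
termination_by s.length - i

def solution (number : String) : String :=
  let s := (PySem.Str.replace (PySem.Str.replace number " " "") "-" "").toList
  String.ofList (PySem.Chars.join ['-'] (solLoopA s 0 []))

-- ===== PORT B =====
-- closed-form chunk sizes from n mod 3 (B's if/elif chain)
def sizesB (n : Nat) : List Nat :=
  if n % 3 = 0 then List.replicate (n / 3) 3
  else if n % 3 = 2 then List.replicate (n / 3) 3 ++ [2]
  else if 4 ≤ n then List.replicate ((n - 4) / 3) 3 ++ [2, 2]
  else [1]

-- for k in sizes: parts.append(s[i:i+k]); i += k
def partsB (s : List Char) (sizes : List Nat) (i : Nat) (parts : List (List Char)) : List (List Char) :=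
  match sizes with
  | [] => parts
  | k :: ks => partsB s ks (i + k) (parts ++ [PySem.List.slice s (some (i : Int)) (some ((i : Int) + (k : Int)))])

def solution_alt (number : String) : String :=
  let s := (PySem.Str.replace (PySem.Str.replace number " " "") "-" "").toList
  String.ofList (PySem.Chars.join ['-'] (partsB s (sizesB s.length) 0 []))

-- ===== PRECONDITION & SPEC =====
def Spec_solution (number : String) (out : String) : Prop := out = solution_alt number
instance (number : String) (out : String) : Decidable (Spec_solution number out) := by unfold Spec_solution; infer_instance

-- ===== CLAIM (what is proved, stated in full; the proofs are below) =====
def Claim_equal_solution : Prop := ∀ (number : String), Dom_solution number → Spec_solution number (solution number)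

-- ===== LEMMAS AND PROOFS =====

-- s[i:i+2] / s[i:i+3] with literal bounds, as drop/take
theorem slice_add_two (xs : List Char) (i : Nat) :
    PySem.List.slice xs (some (i : Int)) (some ((i : Int) + 2)) = (xs.drop i).take 2 := by
  have h : ((i : Int) + 2) = (((i + 2 : Nat)) : Int) := by push_cast; ring
  rw [h, PySem.List.slice_natCast]; simp

theorem slice_add_three (xs : List Char) (i : Nat) :
    PySem.List.slice xs (some (i : Int)) (some ((i : Int) + 3)) = (xs.drop i).take 3 := by
  have h : ((i : Int) + 3) = (((i + 3 : Nat)) : Int) := by push_cast; ring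
  rw [h, PySem.List.slice_natCast]; simp

-- s[i:i+k] with Nat i, k, as drop/take
theorem slice_add_nat (xs : List Char) (i k : Nat) :
    PySem.List.slice xs (some (i : Int)) (some ((i : Int) + (k : Int))) = (xs.drop i).take k := by
  have h : ((i : Int) + (k : Int)) = (((i + k : Nat)) : Int) := by push_cast; ring
  rw [h, PySem.List.slice_natCast]
  simp

-- the chunks of a tail, given a list of sizes
def buildChunks (t : List Char) : List Nat → List (List Char)
  | [] => []
  | k :: ks => t.take k :: buildChunks (t.drop k) ks

-- the size sequence A's loop actually consumes, as a recursion on the remaining length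
def sizesRec (m : Nat) : List Nat :=
  if m = 0 then []
  else if m = 2 ∨ m = 4 then 2 :: sizesRec (m - 2)
  else if m = 1 then [1]
  else 3 :: sizesRec (m - 3)
termination_by m

theorem sizesRec_zero : sizesRec 0 = [] := by rw [sizesRec]; simp
theorem sizesRec_one : sizesRec 1 = [1] := by rw [sizesRec]; norm_num
theorem sizesRec_two (m : Nat) (h : m = 2 ∨ m = 4) : sizesRec m = 2 :: sizesRec (m - 2) := by
  rw [sizesRec, if_neg (by omega), if_pos h]
theorem sizesRec_three (m : Nat) (h : m ≠ 0 ∧ m ≠ 1 ∧ m ≠ 2 ∧ m ≠ 4) :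
    sizesRec m = 3 :: sizesRec (m - 3) := by
  rw [sizesRec, if_neg h.1, if_neg (by omega), if_neg h.2.1]

theorem loopA_build (s : List Char) (i : Nat) (ans : List (List Char)) :
    solLoopA s i ans = ans ++ buildChunks (s.drop i) (sizesRec (s.length - i)) := by
  by_cases hi : i < s.length
  · have hm : s.length - i ≠ 0 := by omega
    by_cases h24 : s.length - i = 2 ∨ s.length - i = 4
    · rw [solLoopA, dif_pos hi, if_pos h24, loopA_build, slice_add_two,
        sizesRec_two _ h24]
      have hdd : s.drop (i + 2) = (s.drop i).drop 2 := by
        rw [List.drop_drop, Nat.add_comm]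
      have hsub : s.length - (i + 2) = s.length - i - 2 := by omega
      simp only [buildChunks, hdd, hsub, List.append_assoc, List.singleton_append]
    · by_cases h1 : s.length - i = 1
      · have hstop : ¬ (i + 3 < s.length) := by omega
        rw [solLoopA, dif_pos hi, if_neg h24, slice_add_three,
          solLoopA, dif_neg hstop, h1, sizesRec_one]
        have hlen : (s.drop i).length = 1 := by simp; omega
        simp only [buildChunks, List.take_of_length_le (le_of_eq hlen),
          List.take_of_length_le (hlen ▸ (by norm_num : (1:Nat) ≤ 3))]
      · rw [solLoopA, dif_pos hi, if_neg h24, loopA_build, slice_add_three,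
          sizesRec_three (s.length - i) (by omega)]
        have hdd : s.drop (i + 3) = (s.drop i).drop 3 := by
          rw [List.drop_drop, Nat.add_comm]
        have hsub : s.length - (i + 3) = s.length - i - 3 := by omega
        simp only [buildChunks, hdd, hsub, List.append_assoc, List.singleton_append]
  · rw [solLoopA, dif_neg hi, show s.length - i = 0 by omega, sizesRec_zero]
    simp [buildChunks]
termination_by s.length - i

theorem partsB_build (s : List Char) (sizes : List Nat) (i : Nat) (parts : List (List Char)) :
    partsB s sizes i parts = parts ++ buildChunks (s.drop i) sizes := by
  induction sizes generalizing i parts with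
  | nil => simp [partsB, buildChunks]
  | cons k ks ih =>
    rw [partsB, ih, slice_add_nat]
    have hdd : s.drop (i + k) = (s.drop i).drop k := by
      rw [List.drop_drop, Nat.add_comm]
    simp only [buildChunks, hdd, List.append_assoc, List.singleton_append]

-- A's recursive size sequence equals B's closed form
theorem sizesRec_eq_sizesB (n : Nat) : sizesRec n = sizesB n := by
  induction n using Nat.strong_induction_on with
  | _ n ih =>
    match n, ih with
    | 0, _ => rw [sizesRec_zero]; simp [sizesB]
    | 1, _ => rw [sizesRec_one]; norm_num [sizesB]
    | 2, _ => rw [sizesRec_two 2 (by omega), sizesRec_zero]; norm_num [sizesB]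
    | 3, _ => rw [sizesRec_three 3 (by omega), sizesRec_zero]; norm_num [sizesB, List.replicate_succ]
    | 4, _ => rw [sizesRec_two 4 (by omega), sizesRec_two 2 (by omega), sizesRec_zero]
              norm_num [sizesB]
    | (m + 5), ih =>
      rw [sizesRec_three _ (by omega), show m + 5 - 3 = m + 2 by omega, ih (m + 2) (by omega)]
      have h3 : (m + 5) % 3 = 0 ∨ (m + 5) % 3 = 1 ∨ (m + 5) % 3 = 2 := by omega
      rcases h3 with h | h | h
      · have e1 : sizesB (m + 5) = List.replicate ((m + 5) / 3) 3 := by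
          unfold sizesB; rw [if_pos h]
        have e2 : sizesB (m + 2) = List.replicate ((m + 2) / 3) 3 := by
          unfold sizesB; rw [if_pos (by omega)]
        have hdiv : (m + 5) / 3 = (m + 2) / 3 + 1 := by omega
        rw [e1, e2, hdiv, List.replicate_succ]
      · have e1 : sizesB (m + 5) = List.replicate ((m + 5 - 4) / 3) 3 ++ [2, 2] := by
          unfold sizesB; rw [if_neg (by omega), if_neg (by omega), if_pos (by omega)]
        have e2 : sizesB (m + 2) = if 4 ≤ m + 2 then List.replicate ((m + 2 - 4) / 3) 3 ++ [2, 2] else [1] := by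
          unfold sizesB; rw [if_neg (by omega), if_neg (by omega)]
        by_cases h4 : 4 ≤ m + 2
        · have hdiv : (m + 5 - 4) / 3 = (m + 2 - 4) / 3 + 1 := by omega
          rw [e1, e2, if_pos h4, hdiv, List.replicate_succ, List.cons_append]
        · -- (m+2) % 3 = 1 with m + 2 < 4 forces m + 2 = 1: impossible (m + 2 ≥ 2)
          omega
      · have e1 : sizesB (m + 5) = List.replicate ((m + 5) / 3) 3 ++ [2] := by
          unfold sizesB; rw [if_neg (by omega), if_pos h]
        have e2 : sizesB (m + 2) = List.replicate ((m + 2) / 3) 3 ++ [2] := by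
          unfold sizesB; rw [if_neg (by omega), if_pos (by omega)]
        have hdiv : (m + 5) / 3 = (m + 2) / 3 + 1 := by omega
        rw [e1, e2, hdiv, List.replicate_succ, List.cons_append]

-- ===== VERDICT (by name: the statement is the Claim_ definition above) =====
theorem solution_spec : Claim_equal_solution := by
  intro number _
  simp only [Spec_solution, solution, solution_alt, loopA_build, partsB_build,
    List.drop_zero, List.nil_append, Nat.sub_zero, sizesRec_eq_sizesB]
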